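-- pv_equiv track=rewrite | github.com/leonardosalasd/doc-engine-cli | doc_engine/converter.py | strip_first_heading
-- ===== SOURCE A (Python) =====
-- def strip_first_heading(markdown: str) -> str:
--     lines = markdown.split("\n")
--     result: list[str] = []
--     found = False
--     for line in lines:
--         if not found and line.strip().startswith("# ") and not line.strip().startswith("##"):
--             found = True
--             continue
--         if found and not result and not line.strip():
--             continue
--         result.append(line)
--     return "\n".join(result)
-- ===== SOURCE B (Python) =====
-- def strip_first_heading(markdown: str) -> str:
--     lines = markdown.split("\n")
--     idx = None
--     for i, line in enumerate(lines):
--         s = line.strip()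
--         if s.startswith("# ") and not s.startswith("##"):
--             idx = i
--             break
--     if idx is None:
--         return "\n".join(lines)
--     prefix = lines[:idx]
--     rest = lines[idx + 1:]
--     if not prefix:
--         while rest and not rest[0].strip():
--             rest.pop(0)
--     return "\n".join(prefix + rest)
-- ===== Notes on version B (the rewrite author's own statement) =====
-- stated objective: simpler
-- what changed: Replaced the single-pass flag/accumulator loop with finding the index of the first H1 line, slicing the list into prefix and rest, and dropping leading blank lines from rest only when the prefix is empty.
import Mathlib
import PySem

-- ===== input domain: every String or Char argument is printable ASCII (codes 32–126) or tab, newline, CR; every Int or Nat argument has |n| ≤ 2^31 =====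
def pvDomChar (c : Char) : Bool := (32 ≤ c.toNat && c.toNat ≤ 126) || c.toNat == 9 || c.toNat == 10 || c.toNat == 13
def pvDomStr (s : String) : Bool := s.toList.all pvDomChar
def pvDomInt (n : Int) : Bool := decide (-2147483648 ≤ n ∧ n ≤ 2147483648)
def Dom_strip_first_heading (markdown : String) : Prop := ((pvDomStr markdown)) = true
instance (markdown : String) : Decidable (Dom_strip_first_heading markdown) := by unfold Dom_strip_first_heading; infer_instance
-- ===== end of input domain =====

-- B replaces A's single-pass flag/accumulator loop by locating the first H1 index, slicing
-- prefix/rest around it, and conditionally dropping leading blanks (objective: simpler decomposition).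

-- helpers shared verbatim by both Pythons: the H1 test and the blank-line test
def pvIsH1 (line : String) : Bool :=
  PySem.Str.startswith (PySem.Str.strip line) "# " && !(PySem.Str.startswith (PySem.Str.strip line) "##")

def pvBlank (line : String) : Bool :=
  PySem.Str.strip line == ""

-- ===== PORT A =====
-- the for-loop over lines with (result, found) state, branches in A's order
def pvLoopA : List String → List String → Bool → List String
  | [], result, _ => result
  | line :: ls, result, found =>
    if !found && pvIsH1 line then pvLoopA ls result true
    else if found && result.isEmpty && pvBlank line then pvLoopA ls result found
    else pvLoopA ls (result ++ [line]) found

def strip_first_heading (markdown : String) : String :=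
  PySem.Str.join "\n" (pvLoopA ((PySem.Str.split? markdown "\n").getD []) [] false)

-- ===== PORT B =====
-- the enumerate-and-break index search of Source B
def pvFindH1 : List String → Option Nat
  | [] => none
  | line :: ls => if pvIsH1 line then some 0 else (pvFindH1 ls).map (· + 1)

def strip_first_heading_alt (markdown : String) : String :=
  let lines := (PySem.Str.split? markdown "\n").getD []
  match pvFindH1 lines with
  | none => PySem.Str.join "\n" lines
  | some i =>
    -- lines[:i] / lines[i+1:] with 0 ≤ i < len(lines): exact as take/drop
    let pre := lines.take i
    let rest := lines.drop (i + 1)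
    -- the while/pop loop removing leading blanks = dropWhile
    let rest := if pre.isEmpty then rest.dropWhile pvBlank else rest
    PySem.Str.join "\n" (pre ++ rest)

-- ===== PRECONDITION & SPEC =====
def Spec_strip_first_heading (markdown : String) (out : String) : Prop := out = strip_first_heading_alt markdown
instance (markdown : String) (out : String) : Decidable (Spec_strip_first_heading markdown out) := by unfold Spec_strip_first_heading; infer_instance

-- ===== CLAIM (what is proved, stated in full; the proofs are below) =====
def Claim_equal_strip_first_heading : Prop := ∀ (markdown : String), Dom_strip_first_heading markdown → Spec_strip_first_heading markdown (strip_first_heading markdown)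

-- ===== LEMMAS AND PROOFS =====

-- what A does to the tail after the heading was consumed and something was already kept
theorem pvLoopA_true_ne (ls : List String) : ∀ (res : List String), res ≠ [] →
    pvLoopA ls res true = res ++ ls := by
  induction ls with
  | nil => intro res _; simp [pvLoopA]
  | cons l ls ih =>
    intro res h
    have hres : res.isEmpty = false := by simpa [List.isEmpty_iff] using h
    have hstep : pvLoopA (l :: ls) res true = pvLoopA ls (res ++ [l]) true := by
      simp [pvLoopA, hres]
    rw [hstep, ih (res ++ [l]) (by simp)]
    simp

-- A with found = true and nothing kept yet: drop leading blanks
theorem pvLoopA_true_nil (ls : List String) :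
    pvLoopA ls [] true = ls.dropWhile pvBlank := by
  induction ls with
  | nil => simp [pvLoopA]
  | cons l ls ih =>
    by_cases hb : pvBlank l = true
    · simp [pvLoopA, hb, ih]
    · simp only [Bool.not_eq_true] at hb
      simp [pvLoopA, hb, pvLoopA_true_ne ls [l] (by simp)]

-- "remove the first H1 line" — characterises A's heading handling once res is nonempty
def pvRemove : List String → List String
  | [] => []
  | l :: ls => if pvIsH1 l then ls else l :: pvRemove ls

theorem pvLoopA_false_ne (ls : List String) : ∀ (res : List String), res ≠ [] →
    pvLoopA ls res false = res ++ pvRemove ls := by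
  induction ls with
  | nil => intro res _; simp [pvLoopA, pvRemove]
  | cons l ls ih =>
    intro res h
    by_cases hp : pvIsH1 l = true
    · simp [pvLoopA, hp, pvRemove, pvLoopA_true_ne ls res h]
    · simp only [Bool.not_eq_true] at hp
      have hstep : pvLoopA (l :: ls) res false = pvLoopA ls (res ++ [l]) false := by
        simp [pvLoopA, hp]
      rw [hstep, ih (res ++ [l]) (by simp)]
      simp [pvRemove, hp]

theorem pvRemove_of_none (ls : List String) (h : pvFindH1 ls = none) :
    pvRemove ls = ls := by
  induction ls with
  | nil => rfl
  | cons l ls ih =>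
    by_cases hp : pvIsH1 l = true
    · simp [pvFindH1, hp] at h
    · simp only [Bool.not_eq_true] at hp
      simp only [pvFindH1, hp, Bool.false_eq_true, if_false, Option.map_eq_none_iff] at h
      simp [pvRemove, hp, ih h]

theorem pvRemove_of_some (ls : List String) : ∀ (i : Nat), pvFindH1 ls = some i →
    pvRemove ls = ls.take i ++ ls.drop (i + 1) := by
  induction ls with
  | nil => intro i h; simp [pvFindH1] at h
  | cons l ls ih =>
    intro i h
    by_cases hp : pvIsH1 l = true
    · simp only [pvFindH1, hp, if_true, Option.some.injEq] at h
      subst h; simp [pvRemove, hp]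
    · simp only [Bool.not_eq_true] at hp
      simp only [pvFindH1, hp, Bool.false_eq_true, if_false, Option.map_eq_some_iff] at h
      obtain ⟨j, hj, rfl⟩ := h
      simp [pvRemove, hp, ih j hj, List.take_succ_cons, List.drop_succ_cons]

-- the main list-level identity: A's loop equals B's slice-based computation
theorem pvLoopA_eq (ls : List String) :
    pvLoopA ls [] false =
      match pvFindH1 ls with
      | none => ls
      | some i =>
        ls.take i ++ (if (ls.take i).isEmpty then (ls.drop (i + 1)).dropWhile pvBlank
                      else ls.drop (i + 1)) := by
  induction ls with
  | nil => simp [pvLoopA, pvFindH1]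
  | cons l ls ih =>
    by_cases hp : pvIsH1 l = true
    · simp [pvLoopA, pvFindH1, hp, pvLoopA_true_nil]
    · simp only [Bool.not_eq_true] at hp
      have hstep : pvLoopA (l :: ls) [] false = [l] ++ pvRemove ls := by
        have h1 : pvLoopA (l :: ls) [] false = pvLoopA ls [l] false := by
          simp [pvLoopA, hp]
        rw [h1, pvLoopA_false_ne ls [l] (by simp)]
      cases h : pvFindH1 ls with
      | none =>
        simp [pvFindH1, hp, h, hstep, pvRemove_of_none ls h]
      | some j =>
        simp [pvFindH1, hp, h, hstep, pvRemove_of_some ls j h, List.take_succ_cons,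
          List.drop_succ_cons]

-- ===== VERDICT (by name: the statement is the Claim_ definition above) =====
theorem strip_first_heading_spec : Claim_equal_strip_first_heading := by
  intro markdown _
  unfold Spec_strip_first_heading strip_first_heading strip_first_heading_alt
  rw [pvLoopA_eq]
  cases h : pvFindH1 ((PySem.Str.split? markdown "\n").getD []) <;> simp [h]
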